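-- pv_equiv track=rewrite | github.com/tomica28/PSZT-snowplow | snowplow.py | get_final_optimal_path
-- ===== SOURCE A (Python) =====
-- def is_edge_in_GoE(edge, goe):
--     for i in range(len(goe) - 1):
--         if(goe[i] == edge[0] and goe[i + 1] == edge[1]):
--             return True
--         if(goe[i] == edge[1] and goe[i + 1] == edge[0]):
--             return True
--     return False
--
-- def get_all_edges_of_GoE(goe):
--     edge_list = list()
--     for i in range(len(goe) - 1):
--         tup = (goe[i], goe[i+1])
--         edge_list.append(tup)
--     return edge_list
--
-- def get_list_of_GoE_with_no_common_edge_with_firstGoE(goe_dict):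
--
--     # dictionary and accumulation for output
--     out_dict = {}
--     acc_edge_list = {}
--     if len(goe_dict) == 0:
--         return [out_dict, acc_edge_list]
--
--     # get first element
--     first_key = list(goe_dict.keys())[0]
--     out_dict[first_key] = goe_dict[first_key]
--     # put edge list of the first GoE into accumulation edge list
--     acc_edge_list = get_all_edges_of_GoE(first_key)
--
--     if len(goe_dict) == 1:
--         return [out_dict, acc_edge_list]
--
--     for j in range(1, len(goe_dict)):
--         is_exist = False
--         for e in acc_edge_list:
--             if is_edge_in_GoE(e, list(goe_dict.keys())[j]):
--                 is_exist = True
--                 break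
--         if not is_exist:
--             out_dict[list(goe_dict.keys())[j]] = list(goe_dict.values())[j]
--             acc_edge_list.extend(get_all_edges_of_GoE(list(goe_dict.keys())[j]))
--
--     return [out_dict, acc_edge_list]
--
-- def remove_all_existed_edges(acc_edge_list, goe_dict):
--
--     if len(acc_edge_list) == 0:
--         return goe_dict
--
--     out_dict = {}
--     for j in range(len(goe_dict)):
--         is_exist = False
--         for e in acc_edge_list:
--             if is_edge_in_GoE(e, list(goe_dict.keys())[j]):
--                 is_exist = True
--                 break
--         if not is_exist:
--             out_dict[list(goe_dict.keys())[j]] = list(goe_dict.values())[j]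
--     return out_dict
--
-- def get_final_optimal_path(ordered_dict_list):
--     acc_edges_list_final = list()
--     optimal_path_dict_final = {}
--     for i in range(len(ordered_dict_list)):
--         # get dictionary at current stage
--         dict = ordered_dict_list[i]
--
--         # remove all GoEs at the one-step-lower level if having any common edge
--         # with existing edges of the optimal path
--         cleaned_dict = remove_all_existed_edges(acc_edges_list_final, dict)
--
--         # get optimal path and accumulation at this stage
--         if len(cleaned_dict) > 0:
--             acc_edges_list = list()
--             optimal_path_dict = {}
--             [optimal_path_dict, acc_edges_list] = get_list_of_GoE_with_no_common_edge_with_firstGoE(cleaned_dict)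
--             # add optimal path and accumulation of this stage to
--             optimal_path_dict_final.update(optimal_path_dict)
--             acc_edges_list_final.extend(acc_edges_list)
--     return optimal_path_dict_final
-- ===== SOURCE B (Python) =====
-- def get_final_optimal_path(ordered_dict_list):
--     accepted_edges = []
--     result = {}
--     for stage in ordered_dict_list:
--         for key, value in stage.items():
--             edges = [(min(key[i], key[i + 1]), max(key[i], key[i + 1]))
--                      for i in range(len(key) - 1)]
--             if all(e not in accepted_edges for e in edges):
--                 result[key] = value
--                 accepted_edges.extend(edges)
--     return result
-- ===== Notes on version B (the rewrite author's own statement) =====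
-- stated objective: simpler
-- what changed: Replaces A's per-stage clean-then-refilter two-pass structure (three helpers, a separate cleaned dict, a 'first key always kept' special case, and list(dict.keys())[j] rebuilt on every index access) with one greedy pass keeping a single accumulated list of (min,max)-normalised undirected edges and one result dict.
import Mathlib
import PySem

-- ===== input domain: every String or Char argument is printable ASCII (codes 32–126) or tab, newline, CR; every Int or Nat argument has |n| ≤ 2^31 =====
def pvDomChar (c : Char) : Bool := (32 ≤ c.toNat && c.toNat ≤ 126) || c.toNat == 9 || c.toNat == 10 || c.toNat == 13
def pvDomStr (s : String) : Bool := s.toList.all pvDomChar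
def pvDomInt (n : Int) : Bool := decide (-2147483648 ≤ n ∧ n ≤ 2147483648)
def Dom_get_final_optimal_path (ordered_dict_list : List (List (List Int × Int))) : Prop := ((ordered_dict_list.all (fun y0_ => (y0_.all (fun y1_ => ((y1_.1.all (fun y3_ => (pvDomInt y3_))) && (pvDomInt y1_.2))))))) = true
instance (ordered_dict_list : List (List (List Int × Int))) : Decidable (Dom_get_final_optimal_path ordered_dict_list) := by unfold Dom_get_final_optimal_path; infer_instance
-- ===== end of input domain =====

-- B collapses A's per-stage clean-then-refilter two-pass structure into a single greedy pass
-- over one accumulated list of (min,max)-normalised undirected edges and one result dict.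


-- ===== PORT A =====
def is_edge_in_GoE (edge : Int × Int) (goe : List Int) : Bool :=
  (List.range (goe.length - 1)).any fun i =>
    (goe.getD i 0 == edge.1 && goe.getD (i + 1) 0 == edge.2) ||
    (goe.getD i 0 == edge.2 && goe.getD (i + 1) 0 == edge.1)

def get_all_edges_of_GoE (goe : List Int) : List (Int × Int) :=
  (List.range (goe.length - 1)).map fun i => (goe.getD i 0, goe.getD (i + 1) 0)

def get_list_of_GoE_with_no_common_edge_with_firstGoE
    (goe_dict : PySem.Dict (List Int) Int) :
    PySem.Dict (List Int) Int × List (Int × Int) :=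
  if goe_dict.size = 0 then (PySem.Dict.empty, [])
  else
    let first_key := goe_dict.keys.getD 0 []
    let out0 := (PySem.Dict.empty : PySem.Dict (List Int) Int).insert first_key (goe_dict.getD first_key 0)
    let acc0 := get_all_edges_of_GoE first_key
    if goe_dict.size = 1 then (out0, acc0)
    else
      (List.range' 1 (goe_dict.size - 1)).foldl
        (fun st j =>
          let kj := goe_dict.keys.getD j []
          if st.2.any (fun e => is_edge_in_GoE e kj) then st
          else (st.1.insert kj (goe_dict.values.getD j 0), st.2 ++ get_all_edges_of_GoE kj))
        (out0, acc0)

def remove_all_existed_edges (acc_edge_list : List (Int × Int))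
    (goe_dict : PySem.Dict (List Int) Int) : PySem.Dict (List Int) Int :=
  if acc_edge_list.length = 0 then goe_dict
  else
    (List.range goe_dict.size).foldl
      (fun out j =>
        let kj := goe_dict.keys.getD j []
        if acc_edge_list.any (fun e => is_edge_in_GoE e kj) then out
        else out.insert kj (goe_dict.values.getD j 0))
      PySem.Dict.empty

def get_final_optimal_path (ordered_dict_list : List (List (List Int × Int))) : List (List Int × Int) :=
  (ordered_dict_list.foldl
    (fun (st : List (Int × Int) × PySem.Dict (List Int) Int) stage =>
      let d := PySem.Dict.ofList stage
      let cleaned := remove_all_existed_edges st.1 d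
      if 0 < cleaned.size then
        let r := get_list_of_GoE_with_no_common_edge_with_firstGoE cleaned
        (st.1 ++ r.2, st.2.update r.1.items)
      else st)
    ([], PySem.Dict.empty)).2.items

-- ===== PORT B =====
def get_final_optimal_path_alt (ordered_dict_list : List (List (List Int × Int))) : List (List Int × Int) :=
  (ordered_dict_list.foldl
    (fun st stage =>
      (PySem.Dict.ofList stage).items.foldl
        (fun (st : List (Int × Int) × PySem.Dict (List Int) Int) kv =>
          let edges := (List.range (kv.1.length - 1)).map fun i =>
            (min (kv.1.getD i 0) (kv.1.getD (i + 1) 0),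
             max (kv.1.getD i 0) (kv.1.getD (i + 1) 0))
          if edges.all (fun e => !(decide (e ∈ st.1))) then (st.1 ++ edges, st.2.insert kv.1 kv.2)
          else st)
        st)
    ([], PySem.Dict.empty)).2.items

-- ===== PRECONDITION & SPEC =====
def Spec_get_final_optimal_path (ordered_dict_list : List (List (List Int × Int))) (out : List (List Int × Int)) : Prop := out = get_final_optimal_path_alt ordered_dict_list
instance (ordered_dict_list : List (List (List Int × Int))) (out : List (List Int × Int)) : Decidable (Spec_get_final_optimal_path ordered_dict_list out) := by unfold Spec_get_final_optimal_path; infer_instance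

-- ===== CLAIM (what is proved, stated in full; the proofs are below) =====
def Claim_equal_get_final_optimal_path : Prop := ∀ (ordered_dict_list : List (List (List Int × Int))), Dom_get_final_optimal_path ordered_dict_list → Spec_get_final_optimal_path ordered_dict_list (get_final_optimal_path ordered_dict_list)

-- ===== LEMMAS AND PROOFS =====

-- (min,max)-normal form of an undirected edge
def pvNorm (e : Int × Int) : Int × Int := (min e.1 e.2, max e.1 e.2)

-- A's uniform within-stage step on (out_dict, stage_acc)
def pvStepA (st : PySem.Dict (List Int) Int × List (Int × Int)) (kv : List Int × Int) :
    PySem.Dict (List Int) Int × List (Int × Int) :=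
  if st.2.any (fun e => is_edge_in_GoE e kv.1) then st
  else (st.1.insert kv.1 kv.2, st.2 ++ get_all_edges_of_GoE kv.1)

-- B's inner step
def pvStepB (st : List (Int × Int) × PySem.Dict (List Int) Int) (kv : List Int × Int) :
    List (Int × Int) × PySem.Dict (List Int) Int :=
  let edges := (List.range (kv.1.length - 1)).map fun i =>
    (min (kv.1.getD i 0) (kv.1.getD (i + 1) 0),
     max (kv.1.getD i 0) (kv.1.getD (i + 1) 0))
  if edges.all (fun e => !(decide (e ∈ st.1))) then (st.1 ++ edges, st.2.insert kv.1 kv.2)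
  else st

-- which pairs a stage accepts, and the resulting stage accumulator
def pvSel : List (List Int × Int) → List (Int × Int) → List (List Int × Int) × List (Int × Int)
  | [], a => ([], a)
  | kv :: r, a =>
    if a.any (fun e => is_edge_in_GoE e kv.1) then pvSel r a
    else
      let p := pvSel r (a ++ get_all_edges_of_GoE kv.1)
      (kv :: p.1, p.2)

lemma pvSel_sublist (c : List (List Int × Int)) (a : List (Int × Int)) :
    (pvSel c a).1.Sublist c := by
  induction c generalizing a with
  | nil => simp [pvSel]
  | cons kv r ih =>
    simp only [pvSel]
    split
    · exact (ih a).trans (List.sublist_cons_self kv r)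
    · exact (ih _).cons₂ kv

lemma pvNorm_match (a b x y : Int) :
    ((a == x && b == y) || (a == y && b == x)) = (pvNorm (a, b) == pvNorm (x, y)) := by
  rw [Bool.eq_iff_iff]
  simp only [pvNorm, Bool.or_eq_true, Bool.and_eq_true, beq_iff_eq, Prod.mk.injEq]
  constructor
  · rintro (⟨rfl, rfl⟩ | ⟨rfl, rfl⟩) <;> constructor <;> omega
  · rintro ⟨h1, h2⟩; omega

lemma pvBedges_eq (k : List Int) :
    ((List.range (k.length - 1)).map fun i =>
      (min (k.getD i 0) (k.getD (i + 1) 0), max (k.getD i 0) (k.getD (i + 1) 0)))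
    = (get_all_edges_of_GoE k).map pvNorm := by
  simp [get_all_edges_of_GoE, List.map_map, pvNorm, Function.comp_def]

-- A's "some accumulated edge occurs in k" test, expressed on normalised edges
lemma pvTestA_eq (acc : List (Int × Int)) (k : List Int) :
    acc.any (fun e => is_edge_in_GoE e k)
    = ((get_all_edges_of_GoE k).map pvNorm).any (fun e => decide (e ∈ acc.map pvNorm)) := by
  rw [Bool.eq_iff_iff]
  simp only [List.any_eq_true, is_edge_in_GoE, get_all_edges_of_GoE,
    List.mem_map, List.mem_range, decide_eq_true_eq]
  constructor
  · rintro ⟨e, he, i, hi, hm⟩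
    rw [pvNorm_match] at hm
    exact ⟨pvNorm (k.getD i 0, k.getD (i + 1) 0), ⟨_, ⟨i, hi, rfl⟩, rfl⟩,
      ⟨e, he, (beq_iff_eq.mp hm).symm⟩⟩
  · rintro ⟨_, ⟨_, ⟨i, hi, rfl⟩, rfl⟩, e, he, hm⟩
    refine ⟨e, he, i, hi, ?_⟩
    rw [pvNorm_match]
    exact beq_iff_eq.mpr hm.symm

-- index loops over a list's positions are folds over the list
lemma pvFoldIdx {α β : Type} (l : List α) (g : β → Nat → β) (f : β → α → β)
    (h : ∀ st j, (hj : j < l.length) → g st j = f st l[j]) :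
    ∀ s init, (List.range' s (l.length - s)).foldl g init = (l.drop s).foldl f init := by
  intro s init
  by_cases hs : l.length ≤ s
  · rw [Nat.sub_eq_zero_of_le hs, List.drop_eq_nil_of_le hs]; rfl
  · have hs : s < l.length := Nat.lt_of_not_le hs
    have hd : l.drop s = l[s] :: l.drop (s + 1) := List.drop_eq_getElem_cons hs
    have hr : l.length - s = (l.length - (s + 1)) + 1 := by omega
    rw [hr, List.range'_succ, hd]
    simp only [List.foldl_cons, h init s hs]
    exact pvFoldIdx l g f h (s + 1) (f init l[s])
termination_by s _ => l.length - s
decreasing_by omega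

lemma pvFoldIdx0 {α β : Type} (l : List α) (g : β → Nat → β) (f : β → α → β)
    (h : ∀ st j, (hj : j < l.length) → g st j = f st l[j]) (init : β) :
    (List.range l.length).foldl g init = l.foldl f init := by
  rw [List.range_eq_range']
  have := pvFoldIdx l g f h 0 init
  simpa using this

lemma pvFoldl_insert_filter (l : List (List Int × Int)) (p : List Int × Int → Bool)
    (d : PySem.Dict (List Int) Int) :
    l.foldl (fun out kv => if p kv then out else out.insert kv.1 kv.2) d
    = (l.filter (fun kv => !p kv)).foldl (fun out kv => out.insert kv.1 kv.2) d := by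
  induction l generalizing d with
  | nil => rfl
  | cons kv r ih =>
    simp only [List.foldl_cons, List.filter_cons]
    by_cases h : p kv <;> simp [h, ih]

-- cleaned dict = filter of the items under Nodup keys
lemma pvRemove_items (acc : List (Int × Int)) (d : PySem.Dict (List Int) Int)
    (hnd : d.keys.Nodup) :
    (remove_all_existed_edges acc d).items
    = d.items.filter (fun kv => !(acc.any (fun e => is_edge_in_GoE e kv.1))) := by
  unfold remove_all_existed_edges
  by_cases ha : acc.length = 0
  · have : acc = [] := List.length_eq_zero_iff.mp ha
    subst this
    simp
  · rw [if_neg ha]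
    have hsz : d.size = d.items.length := rfl
    rw [hsz, pvFoldIdx0 d.items _
      (fun out kv => if acc.any (fun e => is_edge_in_GoE e kv.1) then out
        else out.insert kv.1 kv.2)
      (by
        intro st j hj
        have hk : d.keys.getD j [] = d.items[j].1 := by
          show (d.items.map (·.1)).getD j [] = _
          rw [List.getD_eq_getElem _ _ (by simpa using hj)]
          simp
        have hv : d.values.getD j 0 = d.items[j].2 := by
          show (d.items.map (·.2)).getD j 0 = _
          rw [List.getD_eq_getElem _ _ (by simpa using hj)]
          simp
        simp only [hk, hv])]
    rw [pvFoldl_insert_filter]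
    have hnd' : (d.items.map (·.1)).Nodup := by simpa [PySem.Dict.keys] using hnd
    have hsub : ((d.items.filter
        (fun kv => !(acc.any (fun e => is_edge_in_GoE e kv.1)))).map (·.1)).Nodup :=
      ((List.filter_sublist
        (p := fun kv => !(acc.any (fun e => is_edge_in_GoE e kv.1)))
        (l := d.items)).map (·.1)).nodup hnd'
    have hfresh := PySem.Dict.items_foldl_insert_fresh
      (d.items.filter (fun kv => !(acc.any (fun e => is_edge_in_GoE e kv.1))))
      (·.1) (·.2) PySem.Dict.empty (by intro a _; simp) hsub
    simpa using hfresh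

-- the within-stage fold in terms of pvSel
lemma pvSel_foldl (c : List (List Int × Int)) (a : List (Int × Int))
    (d : PySem.Dict (List Int) Int) :
    c.foldl pvStepA (d, a)
    = ((pvSel c a).1.foldl (fun d kv => d.insert kv.1 kv.2) d, (pvSel c a).2) := by
  induction c generalizing a d with
  | nil => rfl
  | cons kv r ih =>
    simp only [List.foldl_cons, pvSel, pvStepA]
    by_cases h : a.any (fun e => is_edge_in_GoE e kv.1)
    · simp only [h, if_true]
      exact ih a d
    · simp only [h, if_false, Bool.false_eq_true]
      simpa using ih (a ++ get_all_edges_of_GoE kv.1) (d.insert kv.1 kv.2)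

-- the stage helper of A equals the uniform pvSel fold
lemma pvStage_eq (c : PySem.Dict (List Int) Int) (hnd : c.keys.Nodup)
    (hne : c.items ≠ []) :
    get_list_of_GoE_with_no_common_edge_with_firstGoE c
    = ((pvSel c.items []).1.foldl (fun d kv => d.insert kv.1 kv.2) PySem.Dict.empty,
       (pvSel c.items []).2) := by
  obtain ⟨kv0, rest, hcl⟩ := List.exists_cons_of_ne_nil hne
  have hsz : c.size = c.items.length := rfl
  have hk0 : c.keys.getD 0 [] = kv0.1 := by
    show (c.items.map (·.1)).getD 0 [] = _
    rw [hcl]; rfl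
  have hv0 : c.getD kv0.1 0 = kv0.2 := by
    have hm : (kv0.1, kv0.2) ∈ c.items := by rw [hcl]; simp
    exact PySem.Dict.getD_of_mem_items c hm hnd 0
  unfold get_list_of_GoE_with_no_common_edge_with_firstGoE
  rw [if_neg (by rw [hsz, hcl]; simp)]
  simp only [hk0, hv0]
  by_cases h1 : c.size = 1
  · have hr : rest = [] := by
      rw [hsz, hcl] at h1; simpa using h1
    rw [if_pos h1, hcl, hr]
    simp [pvSel]
  · rw [if_neg h1]
    have hrange : c.size - 1 = c.items.length - 1 := by rw [hsz]
    rw [hrange,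
      pvFoldIdx c.items _ pvStepA
      (by
        intro st j hj
        have hk : c.keys.getD j [] = c.items[j].1 := by
          show (c.items.map (·.1)).getD j [] = _
          rw [List.getD_eq_getElem _ _ (by simpa using hj)]
          simp
        have hv : c.values.getD j 0 = c.items[j].2 := by
          show (c.items.map (·.2)).getD j 0 = _
          rw [List.getD_eq_getElem _ _ (by simpa using hj)]
          simp
        simp only [hk, hv, pvStepA]) 1]
    rw [hcl]
    simp only [List.drop_succ_cons, List.drop_zero]
    rw [pvSel_foldl]
    simp [pvSel]

-- THE BRIDGE: B's single accumulator pass over a stage = A's clean-then-select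
lemma pvBridge (s : List (List Int × Int)) (g a : List (Int × Int))
    (final : PySem.Dict (List Int) Int) :
    s.foldl pvStepB ((g ++ a).map pvNorm, final)
    = (((g ++ (pvSel (s.filter (fun kv => !(g.any (fun e => is_edge_in_GoE e kv.1)))) a).2).map pvNorm),
       (pvSel (s.filter (fun kv => !(g.any (fun e => is_edge_in_GoE e kv.1)))) a).1.foldl
         (fun d kv => d.insert kv.1 kv.2) final) := by
  induction s generalizing a final with
  | nil => simp [pvSel]
  | cons kv r ih =>
    simp only [List.foldl_cons, List.filter_cons]
    have hstep : pvStepB ((g ++ a).map pvNorm, final) kv =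
        if (g.any fun e => is_edge_in_GoE e kv.1) then ((g ++ a).map pvNorm, final)
        else if (a.any fun e => is_edge_in_GoE e kv.1) then ((g ++ a).map pvNorm, final)
        else ((g ++ (a ++ get_all_edges_of_GoE kv.1)).map pvNorm, final.insert kv.1 kv.2) := by
      have hcond : (((get_all_edges_of_GoE kv.1).map pvNorm).all
          (fun e => !(decide (e ∈ (g ++ a).map pvNorm))))
          = (!(g.any fun e => is_edge_in_GoE e kv.1) && !(a.any fun e => is_edge_in_GoE e kv.1)) := by
        rw [Bool.eq_iff_iff]
        simp only [List.all_eq_true, Bool.and_eq_true, Bool.not_eq_true', pvTestA_eq,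
          List.any_eq_false, decide_eq_true_eq, List.map_append, List.mem_append,
          decide_eq_false_iff_not]
        constructor
        · intro h
          constructor <;> · intro e he hm; exact h e he (by tauto)
        · rintro ⟨h1, h2⟩ e he hm
          rcases hm with hm | hm
          · exact h1 e he hm
          · exact h2 e he hm
      simp only [pvStepB]
      rw [pvBedges_eq, hcond]
      by_cases hg : (g.any fun e => is_edge_in_GoE e kv.1) <;>
        by_cases ha : (a.any fun e => is_edge_in_GoE e kv.1) <;>
          simp [hg, ha, List.map_append, List.append_assoc]
    by_cases hg : (g.any fun e => is_edge_in_GoE e kv.1)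
    · rw [hstep, if_pos hg]
      have hg' : (g.any fun e => is_edge_in_GoE e kv.1) = true := hg
      simp only [hg', Bool.not_true, Bool.false_eq_true, if_false]
      exact ih a final
    · rw [hstep, if_neg hg]
      have hg' : (g.any fun e => is_edge_in_GoE e kv.1) = false := by simpa using hg
      simp only [hg', Bool.not_false, if_true]
      by_cases ha : (a.any fun e => is_edge_in_GoE e kv.1)
      · rw [if_pos ha]
        have ha' : (a.any fun e => is_edge_in_GoE e kv.1) = true := ha
        simp only [pvSel, ha', if_true]
        exact ih a final
      · rw [if_neg ha]
        have ha' : (a.any fun e => is_edge_in_GoE e kv.1) = false := by simpa using ha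
        simp only [pvSel, ha', Bool.false_eq_true, if_false, List.foldl_cons]
        exact ih (a ++ get_all_edges_of_GoE kv.1) (final.insert kv.1 kv.2)

-- one whole stage of A, in pvSel form
lemma pvStageA_eq (acc : List (Int × Int)) (final : PySem.Dict (List Int) Int)
    (stage : List (List Int × Int)) :
    (let d := PySem.Dict.ofList stage
     let cleaned := remove_all_existed_edges acc d
     if 0 < cleaned.size then
       let r := get_list_of_GoE_with_no_common_edge_with_firstGoE cleaned
       (acc ++ r.2, final.update r.1.items)
     else (acc, final))
    = (acc ++ (pvSel ((PySem.Dict.ofList stage).items.filter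
          (fun kv => !(acc.any (fun e => is_edge_in_GoE e kv.1)))) []).2,
       (pvSel ((PySem.Dict.ofList stage).items.filter
          (fun kv => !(acc.any (fun e => is_edge_in_GoE e kv.1)))) []).1.foldl
         (fun d kv => d.insert kv.1 kv.2) final) := by
  have hnd : (PySem.Dict.ofList stage).keys.Nodup := PySem.Dict.nodup_keys_ofList stage
  have hitems := pvRemove_items acc (PySem.Dict.ofList stage) hnd
  set c := (PySem.Dict.ofList stage).items.filter
      (fun kv => !(acc.any (fun e => is_edge_in_GoE e kv.1))) with hc
  have hsz : (remove_all_existed_edges acc (PySem.Dict.ofList stage)).size = c.length := by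
    show (remove_all_existed_edges acc (PySem.Dict.ofList stage)).items.length = _
    rw [hitems]
  by_cases hce : c = []
  · simp only [hsz, hce]
    simp [pvSel]
  · have hnd' : ((PySem.Dict.ofList stage).items.map (·.1)).Nodup := by
      simpa [PySem.Dict.keys] using hnd
    have hndc : (remove_all_existed_edges acc (PySem.Dict.ofList stage)).keys.Nodup := by
      show ((remove_all_existed_edges acc (PySem.Dict.ofList stage)).items.map (·.1)).Nodup
      rw [hitems]
      exact ((List.filter_sublist
        (p := fun kv => !(acc.any (fun e => is_edge_in_GoE e kv.1)))
        (l := (PySem.Dict.ofList stage).items)).map (·.1)).nodup hnd'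
    have hpos : 0 < (remove_all_existed_edges acc (PySem.Dict.ofList stage)).size := by
      rw [hsz]; exact List.length_pos_of_ne_nil hce
    simp only [hpos, if_true]
    rw [pvStage_eq _ hndc (by rw [hitems]; exact hce), hitems]
    have hkeys : ((pvSel c []).1.map (·.1)).Nodup :=
      ((pvSel_sublist c []).map (·.1)).nodup
        (((List.filter_sublist
          (p := fun kv => !(acc.any (fun e => is_edge_in_GoE e kv.1)))
          (l := (PySem.Dict.ofList stage).items)).map (·.1)).nodup hnd')
    have hupd : ((pvSel c []).1.foldl (fun d kv => d.insert kv.1 kv.2)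
        (PySem.Dict.empty : PySem.Dict (List Int) Int)).items = (pvSel c []).1 := by
      have := PySem.Dict.items_foldl_insert_fresh (pvSel c []).1
        (·.1) (·.2) PySem.Dict.empty (by intro a _; simp) hkeys
      simpa using this
    dsimp only
    simp only [hupd]
    rfl

-- main loop correspondence
lemma pvMain (stages : List (List (List Int × Int))) (acc : List (Int × Int))
    (final : PySem.Dict (List Int) Int) :
    stages.foldl (fun st stage => (PySem.Dict.ofList stage).items.foldl pvStepB st)
      (acc.map pvNorm, final)
    = ((stages.foldl
        (fun (st : List (Int × Int) × PySem.Dict (List Int) Int) stage =>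
          let d := PySem.Dict.ofList stage
          let cleaned := remove_all_existed_edges st.1 d
          if 0 < cleaned.size then
            let r := get_list_of_GoE_with_no_common_edge_with_firstGoE cleaned
            (st.1 ++ r.2, st.2.update r.1.items)
          else st)
        (acc, final)).1.map pvNorm,
       (stages.foldl
        (fun (st : List (Int × Int) × PySem.Dict (List Int) Int) stage =>
          let d := PySem.Dict.ofList stage
          let cleaned := remove_all_existed_edges st.1 d
          if 0 < cleaned.size then
            let r := get_list_of_GoE_with_no_common_edge_with_firstGoE cleaned
            (st.1 ++ r.2, st.2.update r.1.items)
          else st)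
        (acc, final)).2) := by
  induction stages generalizing acc final with
  | nil => rfl
  | cons stage rest ih =>
    simp only [List.foldl_cons]
    have hb := pvBridge (PySem.Dict.ofList stage).items acc [] final
    rw [List.append_nil] at hb
    rw [hb, pvStageA_eq acc final stage]
    exact ih _ _

-- ===== VERDICT (by name: the statement is the Claim_ definition above) =====
theorem get_final_optimal_path_spec : Claim_equal_get_final_optimal_path := by
  intro l _
  show get_final_optimal_path l = get_final_optimal_path_alt l
  have h := pvMain l [] PySem.Dict.empty
  rw [show (([] : List (Int × Int)).map pvNorm) = [] from rfl] at h
  show get_final_optimal_path l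
      = (l.foldl (fun st stage => (PySem.Dict.ofList stage).items.foldl pvStepB st)
          ([], PySem.Dict.empty)).2.items
  rw [h]
  rfl
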